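-- pv_equiv track=rewrite | github.com/guyskk/tianchi-o2o-coupon-usage-predict | pipeline/pandas_parallel.py | _compute_partition_locs
-- ===== SOURCE A (Python) =====
-- def _compute_partition_locs(total, nparts, psize, remain):
--     assert nparts * psize + remain == total, 'partition bug!!'
--     partitions = []
--     for i in range(nparts):
--         if i < remain:
--             begin = i * (psize + 1)
--             end = begin + psize + 1
--         else:
--             begin = i * psize + remain
--             end = begin + psize
--         partitions.append((begin, end))
--     return partitions
-- ===== SOURCE B (Python) =====
-- def _compute_partition_locs(total, nparts, psize, remain):
--     assert nparts * psize + remain == total, 'partition bug!!'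
--
--     def go(offset, n, rem):
--         # divide and conquer: split the n partitions in half, give the left
--         # half its share of the remainder, recurse on both halves
--         if n <= 0:
--             return []
--         if n == 1:
--             size = psize + 1 if rem > 0 else psize
--             return [(offset, offset + size)]
--         half = n // 2
--         lrem = min(rem, half)
--         left = go(offset, half, lrem)
--         right = go(offset + half * psize + lrem, n - half, rem - lrem)
--         return left + right
--
--     return go(0, nparts, remain)
-- ===== Notes on version B (the rewrite author's own statement) =====
-- stated objective: alternative
-- what changed: Replaces the per-index closed-form loop by a divide-and-conquer recursion that splits the partition count in half, gives the left half min(rem, half) of the remainder, and concatenates the two recursively computed halves.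
-- outside the precondition, e.g. on _compute_partition_locs(5, 2, 3, -1): A returns [(-1, 2), (2, 5)], B returns [(0, 3), (2, 5)]
import Mathlib
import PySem

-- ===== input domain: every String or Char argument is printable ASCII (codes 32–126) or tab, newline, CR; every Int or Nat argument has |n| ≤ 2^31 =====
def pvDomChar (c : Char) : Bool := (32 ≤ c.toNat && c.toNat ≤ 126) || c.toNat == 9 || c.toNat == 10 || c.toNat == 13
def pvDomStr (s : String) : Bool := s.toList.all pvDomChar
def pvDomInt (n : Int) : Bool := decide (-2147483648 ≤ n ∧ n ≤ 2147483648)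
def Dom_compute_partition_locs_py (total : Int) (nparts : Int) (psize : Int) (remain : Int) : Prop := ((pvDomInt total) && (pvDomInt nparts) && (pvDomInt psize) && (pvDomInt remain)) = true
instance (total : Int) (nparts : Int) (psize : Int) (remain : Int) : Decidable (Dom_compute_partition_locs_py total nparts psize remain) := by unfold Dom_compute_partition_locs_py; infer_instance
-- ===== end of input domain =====

-- B replaces the per-index closed-form loop by a divide-and-conquer recursion that splits
-- the partition count in half and distributes the remainder; objective: alternative.

-- ===== PORT A =====
-- literal transliteration of A's loop: for i in range(nparts), branch on i < remain,
-- append (begin, end) to the accumulator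
def compute_partition_locs_py (total : Int) (nparts : Int) (psize : Int) (remain : Int) : List (Int × Int) :=
  (PySem.List.pyRange 0 nparts 1).foldl
    (fun partitions i =>
      let be :=
        if i < remain then
          (i * (psize + 1), i * (psize + 1) + psize + 1)
        else
          (i * psize + remain, i * psize + remain + psize)
      partitions ++ [be])
    []

-- ===== PORT B =====
-- the inner recursive helper go(offset, n, rem) of Source B
def pvGoB (psize : Int) (offset : Int) (n : Int) (rem : Int) : List (Int × Int) :=
  if n ≤ 0 then []
  else if n = 1 then
    let size := if rem > 0 then psize + 1 else psize
    [(offset, offset + size)]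
  else
    let half := PySem.Int.floordiv n 2
    let lrem := min rem half
    pvGoB psize offset half lrem ++
      pvGoB psize (offset + half * psize + lrem) (n - half) (rem - lrem)
termination_by n.toNat
decreasing_by
  all_goals simp only [PySem.Int.floordiv_eq_ediv_of_pos (show (0:Int) < 2 by omega)]
  all_goals omega

def compute_partition_locs_py_alt (total : Int) (nparts : Int) (psize : Int) (remain : Int) : List (Int × Int) :=
  pvGoB psize 0 nparts remain

-- ===== PRECONDITION & SPEC =====
-- Pre_ requires the asserted invariant (A raises AssertionError otherwise) and 0 ≤ remain:
-- negative remain is outside the caller's natural domain (remain is the leftover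
-- total - nparts*psize of an even split, always ≥ 0); on it A's first partition begins at
-- the negative index remain, an artefact of its index formula, while B starts at 0.
def Pre_compute_partition_locs_py (total : Int) (nparts : Int) (psize : Int) (remain : Int) : Prop :=
  nparts * psize + remain = total ∧ 0 ≤ remain
instance (total : Int) (nparts : Int) (psize : Int) (remain : Int) : Decidable (Pre_compute_partition_locs_py total nparts psize remain) := by unfold Pre_compute_partition_locs_py; infer_instance

def pvWitness_compute_partition_locs_py : Int × Int × Int × Int := (7, 3, 2, 1)

def Spec_compute_partition_locs_py (total : Int) (nparts : Int) (psize : Int) (remain : Int) (out : List (Int × Int)) : Prop := out = compute_partition_locs_py_alt total nparts psize remain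
instance (total : Int) (nparts : Int) (psize : Int) (remain : Int) (out : List (Int × Int)) : Decidable (Spec_compute_partition_locs_py total nparts psize remain out) := by unfold Spec_compute_partition_locs_py; infer_instance

-- ===== CLAIM (what is proved, stated in full; the proofs are below) =====
def Claim_equal_compute_partition_locs_py : Prop := ∀ (total : Int) (nparts : Int) (psize : Int) (remain : Int), Dom_compute_partition_locs_py total nparts psize remain → Pre_compute_partition_locs_py total nparts psize remain → Spec_compute_partition_locs_py total nparts psize remain (compute_partition_locs_py total nparts psize remain)

-- ===== LEMMAS AND PROOFS =====

-- A's per-index (begin, end) pair equals (f i, f (i+1)) for the boundary function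
-- f i = i*psize + min i remain.
theorem pv_branch_eq (psize remain i : Int) :
    (if i < remain then
        ((i * (psize + 1), i * (psize + 1) + psize + 1) : Int × Int)
      else
        (i * psize + remain, i * psize + remain + psize))
    = (i * psize + min i remain, (i + 1) * psize + min (i + 1) remain) := by
  split_ifs with h
  · rw [min_eq_left h.le, min_eq_left (by omega)]
    simp only [Prod.mk.injEq]; constructor <;> ring
  · rw [min_eq_right (by omega), min_eq_right (by omega)]
    simp only [Prod.mk.injEq]; exact ⟨trivial, by ring⟩

-- A's foldl is the map of (f i, f (i+1)) over range(nparts).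
theorem pv_A_eq (total nparts psize remain : Int) :
    compute_partition_locs_py total nparts psize remain
    = (PySem.List.pyRange 0 nparts 1).map
        (fun i => (i * psize + min i remain, (i + 1) * psize + min (i + 1) remain)) := by
  unfold compute_partition_locs_py
  have : (fun (partitions : List (Int × Int)) (i : Int) =>
      let be :=
        if i < remain then
          (i * (psize + 1), i * (psize + 1) + psize + 1)
        else
          (i * psize + remain, i * psize + remain + psize)
      partitions ++ [be])
    = fun partitions i => partitions ++
        [(i * psize + min i remain, (i + 1) * psize + min (i + 1) remain)] := by
    funext partitions i
    simp only [pv_branch_eq]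
  rw [this, PySem.List.foldl_append_singleton_eq_map]
  simp

-- characterisation of B's divide-and-conquer helper: on k parts with remainder rem ≥ 0
-- it produces the consecutive boundary pairs of f i = i*psize + min i rem, shifted by offset.
theorem pvGoB_eq (psize : Int) : ∀ (k : Nat) (offset rem : Int), 0 ≤ rem →
    pvGoB psize offset (k : Int) rem
    = (List.range k).map (fun (i : Nat) =>
        (offset + ((i : Int) * psize + min (i : Int) rem),
         offset + (((i : Int) + 1) * psize + min ((i : Int) + 1) rem))) := by
  intro k
  induction k using Nat.strong_induction_on with
  | _ k ih =>
    intro offset rem hrem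
    match k with
    | 0 => rw [pvGoB]; simp
    | 1 =>
      rw [pvGoB]
      have c1 : ¬ (((1:Nat):Int) ≤ 0) := by norm_num
      have c2 : ((1:Nat):Int) = 1 := by norm_num
      rw [if_neg c1, if_pos c2]
      split_ifs with hr <;>
        simp only [List.range_one, List.map_cons, List.map_nil, Nat.cast_zero, zero_mul,
          zero_add, one_mul, List.cons.injEq, Prod.mk.injEq, and_true] <;>
        exact ⟨by omega, by omega⟩
    | (m+2) =>
      rw [pvGoB]
      have hn0 : ¬(((m + 2 : Nat) : Int) ≤ 0) := by push_cast; omega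
      have hn1 : ((m + 2 : Nat) : Int) ≠ 1 := by push_cast; omega
      simp only [hn0, if_false, hn1]
      have hfd : PySem.Int.floordiv ((m + 2 : Nat) : Int) 2 = (((m + 2) / 2 : Nat) : Int) := by
        exact_mod_cast PySem.Int.floordiv_natCast (m + 2) 2
      set h : Nat := (m + 2) / 2 with hh
      have hhlt : h < m + 2 := by omega
      have hrlt : m + 2 - h < m + 2 := by omega
      have hhpos : 1 ≤ h := by omega
      simp only [hfd]
      have hsub : ((m + 2 : Nat) : Int) - ((h : Nat) : Int) = ((m + 2 - h : Nat) : Int) := by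
        push_cast; omega
      rw [hsub]
      rw [ih h hhlt offset (min rem (h : Int)) (by omega)]
      rw [ih (m + 2 - h) hrlt _ (rem - min rem (h : Int)) (by omega)]
      have hsplit : List.range (m + 2) = List.range h ++ (List.range (m + 2 - h)).map (h + ·) := by
        rw [← List.range_add]; congr 1; omega
      rw [hsplit, List.map_append, List.map_map]
      congr 1
      · apply List.map_congr_left
        intro i hi
        have hi' : ((i : Int)) < (h : Int) := by exact_mod_cast List.mem_range.mp hi
        have e1 : min (i : Int) (min rem (h : Int)) = min (i : Int) rem := by omega
        have e2 : min ((i : Int) + 1) (min rem (h : Int)) = min ((i : Int) + 1) rem := by omega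
        rw [e1, e2]
      · apply List.map_congr_left
        intro j _
        simp only [Function.comp_apply]
        push_cast
        have eA : ((h : Int) + (j : Int)) * psize = (h : Int) * psize + (j : Int) * psize := by ring
        have eB : ((h : Int) + (j : Int) + 1) * psize
            = (h : Int) * psize + ((j : Int) + 1) * psize := by ring
        rw [Prod.mk.injEq, eA, eB]
        constructor
        · generalize (h : Int) * psize = P
          generalize (j : Int) * psize = Q
          omega
        · generalize (h : Int) * psize = P
          generalize ((j : Int) + 1) * psize = Q
          omega

theorem pv_B_eq (total nparts psize remain : Int) (hrem : 0 ≤ remain) :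
    compute_partition_locs_py_alt total nparts psize remain
    = (PySem.List.pyRange 0 nparts 1).map
        (fun i => (i * psize + min i remain, (i + 1) * psize + min (i + 1) remain)) := by
  unfold compute_partition_locs_py_alt
  by_cases hn : nparts ≤ 0
  · rw [pvGoB]
    simp [hn, PySem.List.pyRange_one_eq_nil hn]
  · obtain ⟨k, rfl⟩ : ∃ k : Nat, nparts = (k : Int) :=
      ⟨nparts.toNat, (Int.toNat_of_nonneg (by omega)).symm⟩
    rw [pvGoB_eq psize k 0 remain hrem, PySem.List.pyRange_one]
    simp only [sub_zero, Int.toNat_natCast, List.map_map]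
    apply List.map_congr_left
    intro i _
    simp only [Function.comp_apply, zero_add]

-- ===== VERDICT (by name: the statement is the Claim_ definition above) =====
theorem compute_partition_locs_py_spec : Claim_equal_compute_partition_locs_py := by
  intro total nparts psize remain _ hpre
  unfold Spec_compute_partition_locs_py
  rw [pv_A_eq, pv_B_eq total nparts psize remain hpre.2]
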